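-- pv_equiv track=rewrite | github.com/eye-yawn/vizAIlearn | [OLD]_app.py | ensemble_summary
-- ===== SOURCE A (Python) =====
-- from collections import defaultdict
--
-- def ensemble_summary(num_summaries, *summaries):
--     votes = defaultdict(int)
--     for summary in summaries:
--         for sentence in summary:
--             votes[str(sentence)] += 1
--
--     # Sort sentences by votes and take the top 'num_summaries'
--     sorted_sentences = sorted(votes.keys(), key=lambda k: votes[k], reverse=True)
--     num_summaries=int(num_summaries)
--     return sorted_sentences[:num_summaries]
-- ===== SOURCE B (Python) =====
-- def ensemble_summary(num_summaries, *summaries):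
--     votes = {}
--     for summary in summaries:
--         for sentence in summary:
--             s = str(sentence)
--             votes[s] = votes.get(s, 0) + 1
--     # counting-sort by vote count: bucket sentences by count, emit highest count first
--     m = 0
--     for c in votes.values():
--         m = max(m, c)
--     buckets = {}
--     for s, c in votes.items():
--         buckets[c] = buckets.get(c, []) + [s]
--     result = []
--     for v in range(m, 0, -1):
--         result += buckets.get(v, [])
--     return result[:int(num_summaries)]
-- ===== Notes on version B (the rewrite author's own statement) =====
-- stated objective: alternative
-- what changed: A sorts the vote dict's keys with a stable descending comparison sort; B replaces the sort by a counting sort: it groups sentences into buckets keyed by vote count (one pass over the vote dict) and emits buckets from the highest count down, preserving first-seen order within ties.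
import Mathlib
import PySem

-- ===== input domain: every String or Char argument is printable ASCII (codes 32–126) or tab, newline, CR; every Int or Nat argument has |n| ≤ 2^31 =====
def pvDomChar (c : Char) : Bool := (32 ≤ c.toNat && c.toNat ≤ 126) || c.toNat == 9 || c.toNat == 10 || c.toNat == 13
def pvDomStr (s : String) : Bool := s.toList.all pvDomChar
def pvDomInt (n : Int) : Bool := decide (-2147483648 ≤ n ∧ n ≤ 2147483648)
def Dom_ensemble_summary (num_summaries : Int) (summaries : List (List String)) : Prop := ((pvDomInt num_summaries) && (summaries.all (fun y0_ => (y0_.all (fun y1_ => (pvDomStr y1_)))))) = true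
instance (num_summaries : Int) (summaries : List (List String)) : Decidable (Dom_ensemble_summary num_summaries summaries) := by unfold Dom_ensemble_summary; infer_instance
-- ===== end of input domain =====

-- B replaces A's stable descending sort of the vote keys by a counting-sort (bucket dict keyed
-- by vote count, emitted from the highest count down); same return value everywhere.

-- ===== PORT A =====
-- the call passes one positional list, so *summaries is the 1-tuple (summaries,): the outer loop
-- runs once and each 'sentence' is a List String, keyed by str(sentence) = Python's list repr.
-- str(list_of_strs): exact hand port on the Dom_ alphabet (printable ASCII + tab/newline/CR):
-- repr of each element (single quotes, or double quotes iff it contains ' and not "; escapes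
-- \\, the quote, \t, \n, \r), joined by ", " inside brackets.
def pvEscChar (q : Char) (c : Char) : List Char :=
  if c = '\\' then ['\\', '\\']
  else if c = q then ['\\', q]
  else if c = Char.ofNat 9 then ['\\', 't']
  else if c = Char.ofNat 10 then ['\\', 'n']
  else if c = Char.ofNat 13 then ['\\', 'r']
  else [c]

def pvReprChars (cs : List Char) : List Char :=
  let q : Char := if cs.contains '\'' && !cs.contains '"' then '"' else '\''
  [q] ++ cs.flatMap (pvEscChar q) ++ [q]

def pvStrOfList (xs : List String) : String :=
  String.ofList (['['] ++ List.intercalate [',', ' '] (xs.map (fun s => pvReprChars s.toList)) ++ [']'])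

def ensemble_summary (num_summaries : Int) (summaries : List (List String)) : List String :=
  -- votes = defaultdict(int); for summary in (summaries,): for sentence in summary: votes[str(sentence)] += 1
  let votes : PySem.Dict String Int :=
    [summaries].foldl (fun d summary =>
      summary.foldl (fun d sentence => d.modify (pvStrOfList sentence) 0 (· + 1)) d) PySem.Dict.empty
  -- sorted(votes.keys(), key=lambda k: votes[k], reverse=True)   (every key is present, so votes[k] = getD k 0)
  let sorted_sentences := PySem.List.sorted votes.keys (fun k => votes.getD k 0) true
  -- int(num_summaries) is the identity on an int; sorted_sentences[:num_summaries]
  PySem.List.slice sorted_sentences none (some num_summaries)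

-- ===== PORT B =====
def ensemble_summary_alt (num_summaries : Int) (summaries : List (List String)) : List String :=
  -- for summary in (summaries,): for sentence in summary: s = str(sentence); votes[s] = votes.get(s, 0) + 1
  let votes : PySem.Dict String Int :=
    [summaries].foldl (fun d summary =>
      summary.foldl (fun d sentence =>
        d.insert (pvStrOfList sentence) (d.getD (pvStrOfList sentence) 0 + 1)) d) PySem.Dict.empty
  -- m = 0; for c in votes.values(): m = max(m, c)
  let m : Int := votes.values.foldl (fun acc c => max acc c) 0
  -- buckets[c] = buckets.get(c, []) + [s]
  let buckets : PySem.Dict Int (List String) :=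
    votes.items.foldl (fun b p => b.modify p.2 [] (· ++ [p.1])) PySem.Dict.empty
  -- for v in range(m, 0, -1): result += buckets.get(v, [])
  let result := (PySem.List.pyRange m 0 (-1)).foldl (fun acc v => acc ++ buckets.getD v []) []
  PySem.List.slice result none (some num_summaries)

-- ===== PRECONDITION & SPEC =====
def Spec_ensemble_summary (num_summaries : Int) (summaries : List (List String)) (out : List String) : Prop := out = ensemble_summary_alt num_summaries summaries
instance (num_summaries : Int) (summaries : List (List String)) (out : List String) : Decidable (Spec_ensemble_summary num_summaries summaries out) := by unfold Spec_ensemble_summary; infer_instance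

-- ===== CLAIM (what is proved, stated in full; the proofs are below) =====
def Claim_equal_ensemble_summary : Prop := ∀ (num_summaries : Int) (summaries : List (List String)), Dom_ensemble_summary num_summaries summaries → Spec_ensemble_summary num_summaries summaries (ensemble_summary num_summaries summaries)

-- ===== LEMMAS AND PROOFS =====

-- both counting loops build Counter(map str summaries)
theorem votesA_eq_counter (summaries : List (List String)) :
    [summaries].foldl (fun d summary =>
      summary.foldl (fun d sentence => d.modify (pvStrOfList sentence) 0 (· + 1)) d) PySem.Dict.empty
    = PySem.Dict.counter (summaries.map pvStrOfList) := by
  rw [PySem.Dict.counter_eq_foldl, List.foldl_map]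
  rfl

theorem votesB_eq_counter (summaries : List (List String)) :
    [summaries].foldl (fun d summary =>
      summary.foldl (fun d sentence =>
        d.insert (pvStrOfList sentence) (d.getD (pvStrOfList sentence) 0 + 1)) d) PySem.Dict.empty
    = PySem.Dict.counter (summaries.map pvStrOfList) := by
  rw [← PySem.Dict.foldl_insert_getD_add_one_eq_counter, List.foldl_map]
  rfl

-- insertBy walks past a prefix none of whose elements x goes before
theorem insertBy_append_not_before {α : Type} (before : α → α → Bool) (x : α)
    (pre post : List α) (h : ∀ a ∈ pre, before x a = false) :
    PySem.List.insertBy before x (pre ++ post) = pre ++ PySem.List.insertBy before x post := by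
  induction pre with
  | nil => simp
  | cons a l ih =>
      have ha := h a (by simp)
      simp only [List.cons_append, PySem.List.insertBy, ha, Bool.false_eq_true, if_false]
      rw [ih (fun b hb => h b (by simp [hb]))]

-- insertBy puts x in front when x goes before every element
theorem insertBy_all_before {α : Type} (before : α → α → Bool) (x : α)
    (l : List α) (h : ∀ a ∈ l, before x a = true) :
    PySem.List.insertBy before x l = x :: l := by
  cases l with
  | nil => rfl
  | cons a t => simp [PySem.List.insertBy, h a (by simp)]

-- inserting x into strictly-descending buckets appends it to its own bucket
theorem insertBy_flatMap_buckets {α : Type} (c : α → Int) (x : α) (vs : List Int)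
    (f : Int → List α) (hs : vs.Pairwise (· > ·)) (hx : c x ∈ vs)
    (hf : ∀ v ∈ vs, ∀ a ∈ f v, c a = v) :
    PySem.List.insertBy (fun a b => decide (c b < c a)) x (vs.flatMap f)
      = vs.flatMap (fun v => f v ++ if c x == v then [x] else []) := by
  induction vs with
  | nil => simp at hx
  | cons v vs' ih =>
      have hgt : ∀ w ∈ vs', w < v := fun w hw => (List.pairwise_cons.1 hs).1 w hw
      have hs' : vs'.Pairwise (· > ·) := (List.pairwise_cons.1 hs).2
      by_cases hxv : c x = v
      · -- bucket of x: pass f v (keys equal), then insert at the front of the tail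
        have hpre : ∀ a ∈ f v, (fun a b => decide (c b < c a)) x a = false := by
          intro a ha
          have := hf v (by simp) a ha
          simp [this, hxv]
        have htail : ∀ a ∈ vs'.flatMap f, (fun a b => decide (c b < c a)) x a = true := by
          intro a ha
          rcases List.mem_flatMap.1 ha with ⟨w, hw, haw⟩
          have : c a = w := hf w (by simp [hw]) a haw
          simp [this, hxv]
          exact hgt w hw
        rw [List.flatMap_cons, insertBy_append_not_before _ _ _ _ hpre,
            insertBy_all_before _ _ _ htail, List.flatMap_cons]
        have hcongr : List.flatMap (fun w => f w ++ if c x == w then [x] else []) vs'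
            = List.flatMap f vs' := by
          refine List.flatMap_congr (fun w hw => ?_)
          have hne : ¬ ((c x == w) = true) := by
            simp only [beq_iff_eq, hxv]
            exact (hgt w hw).ne'
          simp [hne]
        rw [hcongr]
        simp [hxv]
      · -- x's bucket is deeper: pass f v, recurse
        have hx' : c x ∈ vs' := by rcases List.mem_cons.1 hx with h | h; exact absurd h hxv; exact h
        have hlt : c x < v := hgt _ hx'
        have hpre : ∀ a ∈ f v, (fun a b => decide (c b < c a)) x a = false := by
          intro a ha
          have := hf v (by simp) a ha
          simp [this]; omega
        rw [List.flatMap_cons, insertBy_append_not_before _ _ _ _ hpre,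
            ih hs' hx' (fun w hw a ha => hf w (by simp [hw]) a ha), List.flatMap_cons]
        simp [hxv]

-- the stable descending sort is the concatenation of the key-level buckets, highest level first
theorem sorted_rev_eq_flatMap_filter {α : Type} (c : α → Int) (ks : List α) (vs : List Int)
    (hs : vs.Pairwise (· > ·)) (hmem : ∀ k ∈ ks, c k ∈ vs) :
    PySem.List.sorted ks c true = vs.flatMap (fun v => ks.filter (fun k => c k == v)) := by
  induction ks using List.reverseRecOn with
  | nil => simp [PySem.List.sorted_rev_eq_foldl_insertBy]
  | append_singleton t x ih =>
      rw [PySem.List.sorted_rev_eq_foldl_insertBy, List.foldl_append,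
          ← PySem.List.sorted_rev_eq_foldl_insertBy,
          ih (fun k hk => hmem k (by simp [hk]))]
      simp only [List.foldl_cons, List.foldl_nil]
      rw [insertBy_flatMap_buckets c x vs (fun v => t.filter (fun k => c k == v)) hs
            (hmem x (by simp))
            (fun v _ a ha => by simpa using (List.mem_filter.1 ha).2)]
      refine List.flatMap_congr (fun v _ => ?_)
      rw [List.filter_append]
      simp [List.filter_cons]

-- the bucket dict's lookup at v is the keys whose count is v (insertion order)
theorem buckets_getD (d : PySem.Dict String Int) (hnd : d.keys.Nodup) (v : Int) :
    (d.items.foldl (fun b p => b.modify p.2 [] (· ++ [p.1]))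
        (PySem.Dict.empty : PySem.Dict Int (List String))).getD v []
      = d.keys.filter (fun k => d.getD k 0 == v) := by
  have hswap : d.items.foldl (fun b p => b.modify p.2 [] (· ++ [p.1]))
      (PySem.Dict.empty : PySem.Dict Int (List String))
      = (d.items.map Prod.swap).foldl (fun b p => b.modify p.1 [] (· ++ [p.2]))
        (PySem.Dict.empty : PySem.Dict Int (List String)) := by
    rw [List.foldl_map]
    rfl
  rw [hswap, PySem.Dict.getD_foldl_modify_append, PySem.Dict.items_eq_map_keys d hnd 0]
  simp [List.filter_map, List.map_map, Function.comp_def]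

theorem ensemble_summary_eq (num_summaries : Int) (summaries : List (List String)) :
    ensemble_summary num_summaries summaries = ensemble_summary_alt num_summaries summaries := by
  unfold ensemble_summary ensemble_summary_alt
  rw [votesA_eq_counter, votesB_eq_counter]
  set L := summaries.map pvStrOfList with hL
  set d := PySem.Dict.counter L with hd
  have hnd : d.keys.Nodup := PySem.Dict.nodup_keys_counter L
  set m : Int := d.values.foldl (fun acc c => max acc c) 0 with hm
  have hmax : ∀ y ∈ d.values, y ≤ m := by
    intro y hy
    exact (PySem.List.le_foldl_max d.values 0).2 y hy
  -- every key's count lies in (0, m]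
  have hmem : ∀ k ∈ d.keys, d.getD k 0 ∈ PySem.List.pyRange m 0 (-1) := by
    intro k hk
    have hkL : k ∈ L := by
      have : k ∈ PySem.Set.ofList L := by rw [← PySem.Dict.keys_counter L, ← hd]; exact hk
      exact (PySem.Set.mem_ofList L k).1 this
    have hpos : (0 : Int) < d.getD k 0 := by
      rw [hd, PySem.Dict.getD_counter]
      exact_mod_cast List.count_pos_iff.2 hkL
    have hle : d.getD k 0 ≤ m := by
      apply hmax
      rw [PySem.Dict.values_eq_map_keys d hnd 0]
      exact List.mem_map.2 ⟨k, hk, rfl⟩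
    exact PySem.List.mem_pyRange_neg_one.2 ⟨hpos, hle⟩
  have hpw : (PySem.List.pyRange m 0 (-1)).Pairwise (· > ·) := by
    rw [PySem.List.pyRange_neg_one]
    exact List.Pairwise.map _ (fun a b hab => by omega) List.pairwise_lt_range
  show PySem.List.slice (PySem.List.sorted d.keys (fun k => d.getD k 0) true) none (some num_summaries)
      = PySem.List.slice ((PySem.List.pyRange m 0 (-1)).foldl
          (fun acc v => acc ++ (d.items.foldl (fun b p => b.modify p.2 [] (· ++ [p.1]))
            (PySem.Dict.empty : PySem.Dict Int (List String))).getD v []) [])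
          none (some num_summaries)
  congr 1
  rw [PySem.List.foldl_append_eq_flatMap, List.nil_append,
      sorted_rev_eq_flatMap_filter (fun k => d.getD k 0) d.keys (PySem.List.pyRange m 0 (-1)) hpw hmem]
  exact List.flatMap_congr (fun v _ => (buckets_getD d hnd v).symm)

-- ===== VERDICT (by name: the statement is the Claim_ definition above) =====
theorem ensemble_summary_spec : Claim_equal_ensemble_summary := by
  intro num_summaries summaries _
  unfold Spec_ensemble_summary
  exact ensemble_summary_eq num_summaries summaries
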